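-- pv_equiv track=rewrite | github.com/doocs/leetcode | solution/3100-3199/3119.Maximum Number of Potholes That Can Be Fixed/Solution.py | maxPotholes
-- ===== SOURCE A (Python) =====
-- def maxPotholes(road: str, budget: int) -> int:
--     road += "."
--     n = len(road)
--     cnt = [0] * n
--     k = 0
--     for c in road:
--         if c == "x":
--             k += 1
--         elif k:
--             cnt[k] += 1
--             k = 0
--     ans = 0
--     for k in range(n - 1, 0, -1):
--         t = min(budget // (k + 1), cnt[k])
--         ans += t * k
--         budget -= t * (k + 1)
--         cnt[k - 1] += cnt[k] - t
--     return ans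
-- ===== SOURCE B (Python) =====
-- def maxPotholes(road: str, budget: int) -> int:
--     # collect consecutive-'x' run lengths, then greedily fix longest runs first
--     segs = []
--     k = 0
--     for c in road:
--         if c == "x":
--             k += 1
--         else:
--             if k:
--                 segs.append(k)
--             k = 0
--     if k:
--         segs.append(k)
--     ans = 0
--     for L in sorted(segs, reverse=True):
--         if budget >= L + 1:
--             ans += L
--             budget -= L + 1
--         elif budget >= 2:
--             ans += budget - 1
--             break
--         else:
--             break
--     return ans
-- ===== Notes on version B (the rewrite author's own statement) =====
-- stated objective: faster
-- what changed: A maintains a length-indexed bucket table and runs a second loop over all n possible lengths, cascading unfixed segments down one level at a time (demotion); B collects the explicit run lengths, sorts them descending, and scans that (usually much shorter) sorted list once, fixing whole runs while affordable and making one partial fix of budget-1 potholes at the first unaffordable run.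
-- outside the precondition, e.g. on maxPotholes('x', -1): A returns -1, B returns 0; on maxPotholes('.', -1): A returns -1, B returns 0
import Mathlib
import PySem

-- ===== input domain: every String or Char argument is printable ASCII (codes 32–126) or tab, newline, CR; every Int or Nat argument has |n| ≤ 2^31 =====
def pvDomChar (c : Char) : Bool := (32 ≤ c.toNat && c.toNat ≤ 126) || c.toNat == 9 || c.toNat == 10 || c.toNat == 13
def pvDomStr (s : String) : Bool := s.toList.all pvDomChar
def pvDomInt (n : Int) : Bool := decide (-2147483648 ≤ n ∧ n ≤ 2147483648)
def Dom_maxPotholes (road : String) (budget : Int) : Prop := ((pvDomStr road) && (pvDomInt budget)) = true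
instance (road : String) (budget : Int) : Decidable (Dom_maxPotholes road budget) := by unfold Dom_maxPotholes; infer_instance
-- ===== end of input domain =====

-- B replaces A's count-bucket table with demotion cascade by an explicit sorted list of run lengths scanned once (alternative decomposition, same task).


-- ===== PORT A =====
-- A's second loop: for k in range(n - 1, 0, -1): t = min(budget//(k+1), cnt[k]); ans += t*k; budget -= t*(k+1); cnt[k-1] += cnt[k] - t
-- (structural countdown recursion on the level k; cnt indices stay in range on every call A makes)
def potholeLoop : Nat → List Int → Int → Int → Int
  | 0, _, ans, _ => ans
  | k + 1, cnt, ans, budget =>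
    let t := min (PySem.Int.floordiv budget ((k : Int) + 2)) (cnt.getD (k + 1) 0)
    potholeLoop k (cnt.set k (cnt.getD k 0 + (cnt.getD (k + 1) 0 - t)))
      (ans + t * ((k : Int) + 1)) (budget - t * ((k : Int) + 2))

-- first loop: counter k is only ever 0 or incremented, so it is kept as the Nat index it is used as
def maxPotholes (road : String) (budget : Int) : Int :=
  let rs : List Char := road.toList ++ ['.']          -- road += "."
  let n : Nat := rs.length
  let st := rs.foldl (fun (st : List Int × Nat) c =>
      if c = 'x' then (st.1, st.2 + 1)
      else if st.2 ≠ 0 then (st.1.set st.2 (st.1.getD st.2 0 + 1), 0)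
      else (st.1, 0)) (List.replicate n 0, 0)
  potholeLoop (n - 1) st.1 0 budget

-- ===== PORT B =====
-- B's second loop: walk the descending run lengths; fix whole runs while affordable, one partial fix then break
def fixSorted : List Int → Int → Int → Int
  | [], ans, _ => ans
  | L :: rest, ans, budget =>
    if L + 1 ≤ budget then fixSorted rest (ans + L) (budget - (L + 1))
    else if 2 ≤ budget then ans + (budget - 1)
    else ans

def maxPotholes_alt (road : String) (budget : Int) : Int :=
  let st := road.toList.foldl (fun (st : List Int × Int) c =>
      if c = 'x' then (st.1, st.2 + 1)
      else if st.2 ≠ 0 then (st.1 ++ [st.2], 0)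
      else (st.1, 0)) ([], 0)
  let segs := st.1 ++ (if st.2 ≠ 0 then [st.2] else [])
  fixSorted (PySem.List.sorted segs (fun x => x) true) 0 budget

-- ===== PRECONDITION & SPEC =====
-- Pre_ excludes negative budgets, which are outside the problem's natural domain (a repair budget): there
-- A's t = min(budget//(k+1), cnt[k]) goes negative and A returns meaningless negative answers (e.g. -1 on (".", -1)).
def Pre_maxPotholes (road : String) (budget : Int) : Prop := 0 ≤ budget
instance (road : String) (budget : Int) : Decidable (Pre_maxPotholes road budget) := by
  unfold Pre_maxPotholes; infer_instance
def pvWitness_maxPotholes : String × Int := ("xxx.x..xx", 7)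

def Spec_maxPotholes (road : String) (budget : Int) (out : Int) : Prop := out = maxPotholes_alt road budget
instance (road : String) (budget : Int) (out : Int) : Decidable (Spec_maxPotholes road budget out) := by
  unfold Spec_maxPotholes; infer_instance

-- ===== CLAIM (what is proved, stated in full; the proofs are below) =====
def Claim_equal_maxPotholes : Prop := ∀ (road : String) (budget : Int), Dom_maxPotholes road budget → Pre_maxPotholes road budget → Spec_maxPotholes road budget (maxPotholes road budget)

-- ===== LEMMAS AND PROOFS =====

-- the run lengths A's first loop tallies / B's first loop appends, as a recursion on the characters
def crN : List Char → Nat → List Nat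
  | [], _ => []
  | c :: rest, k =>
    if c = 'x' then crN rest (k + 1)
    else if k ≠ 0 then k :: crN rest 0
    else crN rest 0

def tailK : List Char → Nat → Nat
  | [], k => k
  | c :: rest, k => if c = 'x' then tailK rest (k + 1) else tailK rest 0

def bump : List Int → List Nat → List Int :=
  fun cnt js => js.foldl (fun c j => c.set j (c.getD j 0 + 1)) cnt

-- the multiset of remaining run lengths encoded by A's bucket table, levels K down to 1, longest first
def expC : Nat → List Int → List Int
  | 0, _ => []
  | K + 1, cnt => List.replicate (cnt.getD (K + 1) 0).toNat ((K : Int) + 1) ++ expC K cnt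

-- element bounds of the collected run lengths
theorem crN_mem_bounds : ∀ (l : List Char) (k : Nat), ∀ j ∈ crN l k, 1 ≤ j ∧ j ≤ k + l.count 'x'
  | [], k => by simp [crN]
  | c :: rest, k => by
    by_cases hc : c = 'x'
    · intro j hj
      have := crN_mem_bounds rest (k + 1) j (by simpa [crN, hc] using hj)
      simp [hc, List.count_cons]
      omega
    · intro j hj
      by_cases hk : k ≠ 0
      · rcases (by simpa [crN, hc, hk] using hj : j = k ∨ j ∈ crN rest 0) with h | h
        · subst h; simp [List.count_cons]; omega
        · have := crN_mem_bounds rest 0 j h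
          simp [List.count_cons, hc]; omega
      · have := crN_mem_bounds rest 0 j (by simpa [crN, hc, hk] using hj)
        simp [List.count_cons, hc]; omega

-- appending the sentinel '.' is the trailing flush
theorem crN_append_dot : ∀ (l : List Char) (k : Nat),
    crN (l ++ ['.']) k = crN l k ++ (if tailK l k ≠ 0 then [tailK l k] else [])
  | [], k => by by_cases hk : k ≠ 0 <;> simp [crN, tailK, hk]
  | c :: rest, k => by
    by_cases hc : c = 'x'
    · simp [crN, tailK, hc, crN_append_dot rest (k + 1)]
    · by_cases hk : k ≠ 0 <;> simp [crN, tailK, hc, hk, crN_append_dot rest 0]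

-- A's first loop is: tally each collected run length into the table
theorem foldA_eq_bump : ∀ (l : List Char) (cnt : List Int) (k : Nat),
    l.foldl (fun (st : List Int × Nat) c =>
      if c = 'x' then (st.1, st.2 + 1)
      else if st.2 ≠ 0 then (st.1.set st.2 (st.1.getD st.2 0 + 1), 0)
      else (st.1, 0)) (cnt, k) = (bump cnt (crN l k), tailK l k)
  | [], cnt, k => by simp [crN, tailK, bump]
  | c :: rest, cnt, k => by
    by_cases hc : c = 'x'
    · simp only [List.foldl_cons, hc, if_pos rfl, ite_true]
      simpa [hc, crN, tailK] using foldA_eq_bump rest cnt (k + 1)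
    · by_cases hk : k ≠ 0
      · simp only [List.foldl_cons, crN, tailK, hc, hk, if_neg hc, ite_true, ite_false, ne_eq,
          not_false_eq_true, bump, List.foldl_cons]
        simpa [bump] using foldA_eq_bump rest (cnt.set k (cnt.getD k 0 + 1)) 0
      · simp only [List.foldl_cons, crN, tailK, hc, hk, if_neg hc, ite_false, ne_eq]
        simpa [hk, crN, tailK] using foldA_eq_bump rest cnt 0

-- B's first loop appends the same run lengths, as Ints
theorem foldB_eq_crN : ∀ (l : List Char) (acc : List Int) (k : Nat),
    l.foldl (fun (st : List Int × Int) c =>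
      if c = 'x' then (st.1, st.2 + 1)
      else if st.2 ≠ 0 then (st.1 ++ [st.2], 0)
      else (st.1, 0)) (acc, (k : Int)) =
      (acc ++ (crN l k).map (fun (j : Nat) => (j : Int)), (tailK l k : Int))
  | [], acc, k => by simp [crN, tailK]
  | c :: rest, acc, k => by
    by_cases hc : c = 'x'
    · simp only [List.foldl_cons, hc, if_pos rfl, ite_true, crN, tailK]
      have h1 : ((k : Int) + 1) = ((k + 1 : Nat) : Int) := by push_cast; ring
      rw [h1]
      simpa [hc, crN, tailK] using foldB_eq_crN rest acc (k + 1)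
    · by_cases hk : k ≠ 0
      · have hki : ((k : Int) ≠ 0) := by exact_mod_cast hk
        simp only [List.foldl_cons, if_neg hc, hki, ite_true, ite_false, ne_eq, not_false_eq_true, crN, tailK, hc, hk]
        simpa using foldB_eq_crN rest (acc ++ [(k : Int)]) 0
      · have hk0 : k = 0 := by omega
        subst hk0
        simp only [List.foldl_cons, if_neg hc, crN, tailK, hc]
        simpa using foldB_eq_crN rest acc 0

theorem bump_length : ∀ (js : List Nat) (cnt : List Int), (bump cnt js).length = cnt.length
  | [], cnt => rfl
  | j :: js, cnt => by
    simp only [bump, List.foldl_cons]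
    simpa [bump] using bump_length js (cnt.set j (cnt.getD j 0 + 1))

theorem bump_getD : ∀ (js : List Nat) (cnt : List Int) (m : Nat),
    (∀ j ∈ js, j < cnt.length) →
    (bump cnt js).getD m 0 = cnt.getD m 0 + (js.count m : Int)
  | [], cnt, m, _ => by simp [bump]
  | j :: js, cnt, m, h => by
    have hj : j < cnt.length := h j (by simp)
    have ih := bump_getD js (cnt.set j (cnt.getD j 0 + 1)) m
      (by intro i hi; simpa using h i (by simp [hi]))
    simp only [bump, List.foldl_cons] at ih ⊢
    rw [ih]
    by_cases hm : j = m
    · subst hm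
      simp [List.getD, hj, List.count_cons]
      ring
    · simp [List.getD, List.getElem?_set, hm, List.count_cons, Ne.symm hm]

-- ===== facts about expC =====
theorem mem_expC : ∀ (K : Nat) (cnt : List Int), ∀ x ∈ expC K cnt, 1 ≤ x ∧ x ≤ (K : Int)
  | 0, cnt => by simp [expC]
  | K + 1, cnt => by
    intro x hx
    simp only [expC] at hx
    rcases List.mem_append.1 hx with h | h
    · have hx' := List.eq_of_mem_replicate h
      subst hx'
      constructor <;> push_cast <;> omega
    · have h1 := mem_expC K cnt x h
      have h2 := h1.2
      push_cast at h2 ⊢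
      exact ⟨h1.1, by omega⟩

theorem expC_congr : ∀ (K : Nat) (cnt cnt' : List Int),
    (∀ j ≤ K, cnt.getD j 0 = cnt'.getD j 0) → expC K cnt = expC K cnt'
  | 0, _, _, _ => rfl
  | K + 1, cnt, cnt', h => by
    simp only [expC]
    rw [h (K + 1) (le_refl _), expC_congr K cnt cnt' (fun j hj => h j (by omega))]

theorem expC_pairwise : ∀ (K : Nat) (cnt : List Int),
    (expC K cnt).Pairwise (fun a b : Int => b ≤ a)
  | 0, _ => by simp [expC]
  | K + 1, cnt => by
    simp only [expC]
    refine List.pairwise_append.2 ⟨?_, expC_pairwise K cnt, ?_⟩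
    · exact List.pairwise_replicate.2 (Or.inr (le_refl _))
    · intro a ha b hb
      have hb' := (mem_expC K cnt b hb).2
      have ha' := List.eq_of_mem_replicate ha
      subst ha'
      push_cast at hb' ⊢
      omega

theorem count_expC : ∀ (K : Nat) (cnt : List Int) (x : Int), 1 ≤ x →
    (expC K cnt).count x = if x ≤ (K : Int) then (cnt.getD x.toNat 0).toNat else 0
  | 0, cnt, x, hx => by
    simp [expC]
    omega
  | K + 1, cnt, x, hx => by
    simp only [expC, List.count_append, List.count_replicate, count_expC K cnt x hx]
    by_cases hxK : x = (K : Int) + 1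
    · have ht : x.toNat = K + 1 := by omega
      have h1 : ¬ (x ≤ (K : Int)) := by omega
      have h2 : x ≤ (K : Int) + 1 := by omega
      rw [ht]
      simp [hxK, h1, h2]
    · have hne : (((K : Int) + 1) == x) = false := by
        simp [Ne.symm hxK]
      rw [hne]
      by_cases hle : x ≤ (K : Int)
      · have h2 : x ≤ (K : Int) + 1 := by omega
        simp [hle, h2]
      · have h2 : ¬ (x ≤ (K : Int) + 1) := by omega
        simp [hle, h2]

-- ===== facts about fixSorted =====
theorem fixSorted_small (l : List Int) (ans b : Int) (hb : b ≤ 1)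
    (hl : ∀ x ∈ l, 1 ≤ x) : fixSorted l ans b = ans := by
  cases l with
  | nil => rfl
  | cons L rest =>
    have h1 : 1 ≤ L := hl L (by simp)
    have h2 : ¬ (L + 1 ≤ b) := by omega
    have h3 : ¬ ((2 : Int) ≤ b) := by omega
    simp [fixSorted, h2, h3]

theorem fixSorted_replicate : ∀ (m : Nat) (L : Int) (rest : List Int) (ans b : Int),
    (m : Int) * (L + 1) ≤ b → 0 ≤ L →
    fixSorted (List.replicate m L ++ rest) ans b =
      fixSorted rest (ans + (m : Int) * L) (b - (m : Int) * (L + 1))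
  | 0, L, rest, ans, b, _, _ => by simp [fixSorted]
  | m + 1, L, rest, ans, b, h, hL => by
    have hLb : L + 1 ≤ b := by
      push_cast at h
      nlinarith
    simp only [List.replicate_succ, List.cons_append, fixSorted, if_pos hLb]
    rw [fixSorted_replicate m L rest (ans + L) (b - (L + 1)) (by push_cast at h ⊢; nlinarith) hL]
    congr 1 <;> push_cast <;> ring

-- once the budget cannot cover the longest remaining run, only the partial fix remains
theorem fixSorted_partial (K : Nat) (cnt : List Int) (ans b : Int)
    (hb0 : 0 ≤ b) (hb : b ≤ (K : Int) + 2) (hc : 1 ≤ cnt.getD (K + 1) 0) :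
    fixSorted (expC (K + 1) cnt) ans b = ans + (if 2 ≤ b then b - 1 else 0) := by
  have hm : 1 ≤ (cnt.getD (K + 1) 0).toNat := by omega
  obtain ⟨m', hm'⟩ : ∃ m', (cnt.getD (K + 1) 0).toNat = m' + 1 := ⟨_, (Nat.succ_pred_eq_of_pos hm).symm⟩
  have hrest : ∀ x ∈ (List.replicate m' ((K : Int) + 1) ++ expC K cnt), 1 ≤ x := by
    intro x hx
    rcases List.mem_append.1 hx with h | h
    · have hx' := List.eq_of_mem_replicate h; subst hx'; push_cast; omega
    · exact (mem_expC K cnt x h).1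
  simp only [expC, hm', List.replicate_succ, List.cons_append, fixSorted]
  by_cases hfull : (K : Int) + 1 + 1 ≤ b
  · have hb2 : b = (K : Int) + 2 := by omega
    rw [if_pos hfull, fixSorted_small _ _ _ (by omega) hrest]
    rw [if_pos (by omega)]
    omega
  · rw [if_neg hfull]
    by_cases h2 : (2 : Int) ≤ b <;> simp [h2]

-- the heart: A's demotion loop computes B's scan of the bucket expansion
theorem potholeLoop_eq_fixSorted : ∀ (K : Nat) (cnt : List Int) (ans b : Int),
    0 ≤ b → K < cnt.length → (∀ j, 0 ≤ cnt.getD j 0) →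
    potholeLoop K cnt ans b = fixSorted (expC K cnt) ans b
  | 0, cnt, ans, b, _, _, _ => by simp [potholeLoop, expC, fixSorted]
  | K + 1, cnt, ans, b, hb, hlen, hnn => by
    have hpos : (0 : Int) < (K : Int) + 2 := by positivity
    set m := cnt.getD (K + 1) 0 with hm
    set q := PySem.Int.floordiv b ((K : Int) + 2) with hq
    have hq0 : 0 ≤ q := by
      rw [hq, PySem.Int.floordiv_eq_ediv_of_pos hpos]
      exact Int.ediv_nonneg hb (by omega)
    by_cases hcase : m ≤ q
    · -- all segments at this level are fixed; nothing is demoted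
      have ht : min q m = m := min_eq_right hcase
      have hmb : m * ((K : Int) + 2) ≤ b :=
        (PySem.Int.le_floordiv_iff_mul_le hpos).1 hcase
      have hb' : 0 ≤ b - m * ((K : Int) + 2) := by omega
      have hnn' : ∀ j, 0 ≤ (cnt.set K (cnt.getD K 0 + (m - m))).getD j 0 := by
        intro j
        by_cases hj : K = j
        · subst hj
          by_cases hKl : K < cnt.length
          · simpa [List.getD, List.getElem?_set, hKl] using hnn K
          · rw [List.set_eq_of_length_le (by omega : cnt.length ≤ K)]
            exact hnn K
        · simpa [List.getD, List.getElem?_set, hj] using hnn j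
      have ih := potholeLoop_eq_fixSorted K (cnt.set K (cnt.getD K 0 + (m - m)))
        (ans + m * ((K : Int) + 1)) (b - m * ((K : Int) + 2)) hb' (by simpa using (by omega : K < cnt.length)) hnn'
      have hexp : expC K (cnt.set K (cnt.getD K 0 + (m - m))) = expC K cnt := by
        apply expC_congr
        intro j hj
        by_cases hjK : K = j
        · subst hjK
          by_cases hKl : K < cnt.length
          · simp [List.getD, List.getElem?_set, hKl]
          · rw [List.set_eq_of_length_le (by omega : cnt.length ≤ K)]
        · simp [List.getD, List.getElem?_set, hjK]
      have hm0 : 0 ≤ m := hnn (K + 1)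
      have hcast : ((m.toNat : Int)) = m := Int.toNat_of_nonneg hm0
      simp only [potholeLoop, ← hq, ← hm, ht]
      rw [ih, hexp]
      simp only [expC, ← hm]
      rw [fixSorted_replicate m.toNat ((K : Int) + 1) (expC K cnt) ans b
        (by rw [hcast, show (K : Int) + 1 + 1 = (K : Int) + 2 from by ring]; exact hmb) (by positivity)]
      rw [hcast]
      congr 1
    · -- partial phase: q < m full fixes, at least one segment is demoted
      push_neg at hcase
      have ht : min q m = q := min_eq_left (by omega)
      have hqb : q * ((K : Int) + 2) ≤ b :=
        (PySem.Int.le_floordiv_iff_mul_le hpos).1 (le_refl _)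
      set b' := b - q * ((K : Int) + 2) with hb'def
      have hb'mod : b' = PySem.Int.mod b ((K : Int) + 2) := by
        have hdm := PySem.Int.floordiv_mul_add_mod b ((K : Int) + 2)
        rw [hb'def, hq]; omega
      have hb'0 : 0 ≤ b' := by rw [hb'mod]; exact PySem.Int.mod_nonneg _ hpos
      have hb'lt : b' < (K : Int) + 2 := by rw [hb'mod]; exact PySem.Int.mod_lt _ hpos
      set cnt' := cnt.set K (cnt.getD K 0 + (m - q)) with hcnt'
      have hKl : K < cnt.length := by omega
      have hcnt'K : cnt'.getD K 0 = cnt.getD K 0 + (m - q) := by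
        simp [hcnt', List.getD, List.getElem?_set, hKl]
      have hnn' : ∀ j, 0 ≤ cnt'.getD j 0 := by
        intro j
        by_cases hj : K = j
        · subst hj; rw [hcnt'K]; have := hnn K; omega
        · simpa [hcnt', List.getD, List.getElem?_set, hj] using hnn j
      have ih := potholeLoop_eq_fixSorted K cnt' (ans + q * ((K : Int) + 1)) b' hb'0
        (by simpa [hcnt'] using hKl) hnn'
      simp only [potholeLoop, ← hq, ← hm, ht, ← hcnt', ← hb'def]
      rw [ih]
      -- evaluate the right-hand side by splitting off the q affordable copies
      have hm0 : 0 ≤ m := hnn (K + 1)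
      have hsplit : m.toNat = q.toNat + (m - q).toNat := by omega
      have hRHS : fixSorted (expC (K + 1) cnt) ans b =
          fixSorted (List.replicate (m - q).toNat ((K : Int) + 1) ++ expC K cnt)
            (ans + q * ((K : Int) + 1)) b' := by
        simp only [expC, ← hm, hsplit, List.replicate_add, List.append_assoc]
        rw [fixSorted_replicate q.toNat ((K : Int) + 1) _ ans b
          (by rw [Int.toNat_of_nonneg hq0, show (K : Int) + 1 + 1 = (K : Int) + 2 from by ring]; exact hqb) (by positivity)]
        rw [Int.toNat_of_nonneg hq0]
        have hb2 : b - q * ((K : Int) + 1 + 1) = b' := by rw [hb'def]; ring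
        rw [hb2]
      rw [hRHS]
      -- the demoted table's expansion starts with the same (m-q) leftover copies, one level down
      have hmq1 : 1 ≤ (m - q).toNat := by omega
      obtain ⟨r, hr⟩ : ∃ r, (m - q).toNat = r + 1 := ⟨_, (Nat.succ_pred_eq_of_pos hmq1).symm⟩
      cases K with
      | zero =>
        simp only [expC, fixSorted]
        have hb'2 : b' < 2 := by exact_mod_cast hb'lt
        have hna : ¬ ((0 : Int) + 1 + 1 ≤ b') := by omega
        have hn2 : ¬ ((2 : Int) ≤ b') := by omega
        simp [hr, List.replicate_succ, fixSorted, hna, hn2]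
      | succ K' =>
        have hc1 : 1 ≤ cnt'.getD (K' + 1) 0 := by
          rw [hcnt'K]
          have h1 := hnn (K' + 1)
          omega
        rw [fixSorted_partial K' cnt' _ b' hb'0 (by push_cast at hb'lt ⊢; omega) hc1]
        simp only [hr, List.replicate_succ, List.cons_append, fixSorted]
        have hna : ¬ (((K' + 1 : Nat) : Int) + 1 + 1 ≤ b') := by push_cast at hb'lt ⊢; omega
        rw [if_neg hna]
        split_ifs with h2 <;> ring

-- counts of the expanded bucket table agree with the collected (cast) run lengths
theorem sorted_runs_eq_expC (l : List Char) :
    PySem.List.sorted ((crN (l ++ ['.']) 0).map (fun (j : Nat) => (j : Int))) (fun x => x) true =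
      expC l.length (bump (List.replicate (l.length + 1) 0) (crN (l ++ ['.']) 0)) := by
  set js := crN (l ++ ['.']) 0 with hjs
  set cnt0 := bump (List.replicate (l.length + 1) 0) js with hcnt0
  have hxcount : (l ++ ['.']).count 'x' = l.count 'x' := by
    simp [List.count_append]
  have hbounds : ∀ j ∈ js, 1 ≤ j ∧ j ≤ l.length := by
    intro j hj
    have h1 := crN_mem_bounds (l ++ ['.']) 0 j hj
    have h2 : l.count 'x' ≤ l.length := List.count_le_length
    omega
  have hlt : ∀ j ∈ js, j < l.length + 1 := fun j hj => by have := hbounds j hj; omega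
  have hgetD : ∀ m : Nat, cnt0.getD m 0 = (js.count m : Int) := by
    intro m
    rw [hcnt0, bump_getD js _ m (by simpa using hlt)]
    simp [List.getD, List.getElem?_replicate]
    split_ifs <;> simp
  have hcount : ∀ x : Int, ((js.map (fun (j : Nat) => (j : Int))).count x) = (expC l.length cnt0).count x := by
    intro x
    by_cases hx : 1 ≤ x
    · rw [count_expC l.length cnt0 x hx]
      have hinj : Function.Injective (fun j : Nat => (j : Int)) := fun a b h => by simpa using h
      have hxcast : ((x.toNat : Nat) : Int) = x := Int.toNat_of_nonneg (by omega)
      have hmapcount : (js.map (fun (j : Nat) => (j : Int))).count x = js.count x.toNat := by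
        rw [← hxcast]
        exact List.count_map_of_injective js _ hinj x.toNat
      rw [hmapcount, hgetD x.toNat]
      by_cases hle : x ≤ (l.length : Int)
      · simp [hle]
      · have hzero : js.count x.toNat = 0 := by
          rw [List.count_eq_zero]
          intro hmem
          have := hbounds _ hmem
          omega
        simp [hle, hzero]
    · have h1 : (js.map (fun (j : Nat) => (j : Int))).count x = 0 := by
        rw [List.count_eq_zero]
        intro hmem
        rcases List.mem_map.1 hmem with ⟨j, hj, hcast⟩
        have := hbounds j hj
        omega
      have h2 : (expC l.length cnt0).count x = 0 := by
        rw [List.count_eq_zero]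
        intro hmem
        exact hx (mem_expC _ _ _ hmem).1
      rw [h1, h2]
  have hperm : (PySem.List.sorted ((js.map (fun (j : Nat) => (j : Int)))) (fun x => x) true).Perm
      (expC l.length cnt0) := by
    refine (PySem.List.sorted_perm _ _ _).trans ?_
    exact List.perm_iff_count.2 hcount
  refine List.eq_of_perm_of_sorted (fun a b _ _ h1 h2 => le_antisymm h2 h1) ?_ ?_ hperm
  · exact PySem.List.sorted_pairwise_rev _ _
  · exact expC_pairwise _ _

theorem maxPotholes_spec : Claim_equal_maxPotholes := by
  intro road budget _ hpre
  unfold Pre_maxPotholes at hpre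
  unfold Spec_maxPotholes maxPotholes maxPotholes_alt
  have hB := foldB_eq_crN road.toList [] 0
  simp only [Nat.cast_zero] at hB
  simp only [List.length_append, List.length_cons, List.length_nil]
  rw [foldA_eq_bump (road.toList ++ ['.']) (List.replicate (road.toList.length + 1) 0) 0, hB]
  simp only [List.nil_append]
  set l := road.toList with hl
  -- B's trailing flush: the Int test equals the Nat test, and the flushed run is the cast one
  have hflush : ((crN l 0).map (fun (j : Nat) => (j : Int)) ++
        (if (tailK l 0 : Int) ≠ 0 then [(tailK l 0 : Int)] else [])) =
      (crN (l ++ ['.']) 0).map (fun (j : Nat) => (j : Int)) := by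
    rw [crN_append_dot l 0, List.map_append]
    congr 1
    by_cases hk : tailK l 0 ≠ 0
    · have hki : ((tailK l 0 : Int)) ≠ 0 := by exact_mod_cast hk
      simp [hk, hki]
    · have hk0 : tailK l 0 = 0 := by omega
      simp [hk0]
  rw [hflush, sorted_runs_eq_expC l]
  have hlen : l.length < (bump (List.replicate (l.length + 1) 0) (crN (l ++ ['.']) 0)).length := by
    rw [bump_length]
    simp
  have hnn : ∀ j, 0 ≤ (bump (List.replicate (l.length + 1) 0) (crN (l ++ ['.']) 0)).getD j 0 := by
    intro j
    rw [bump_getD _ _ j]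
    · simp only [List.getD, List.getElem?_replicate]
      split_ifs <;> simp
    · intro i hi
      have h1 := crN_mem_bounds (l ++ ['.']) 0 i hi
      have h2 : (l ++ ['.']).count 'x' = l.count 'x' := by simp [List.count_append]
      have h3 : l.count 'x' ≤ l.length := List.count_le_length
      simp only [List.length_replicate]
      omega
  have := potholeLoop_eq_fixSorted l.length
    (bump (List.replicate (l.length + 1) 0) (crN (l ++ ['.']) 0)) 0 budget hpre hlen hnn
  simpa using this
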